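-- pv_equiv track=rewrite | github.com/kirsty-tortoise/comp4-simulation | COMP4_Simulation/ExpressionsEvaluation.py | removableBrackets
-- ===== SOURCE A (Python) =====
-- def removableBrackets(exp, openBrackets, closeBrackets):
--     '''
--     This function takes an expression and a list of possible open and close brackets and returns a boolean stating whether there are removable brackets.
--     '''
--
--     if not (exp[0] in openBrackets and exp[-1] in closeBrackets):
--         # There isn't a bracket at the beginning or at the end, so it can't be surrounded.
--         return False
--
--     # bracketCount counts the net (open brackets are + and close brackets are -) number of brackets encountered so far.
--     bracketCount = 1
--
--     for character in exp[1:-1]: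
--
--         if character in openBrackets:
--             bracketCount += 1
--
--         elif character in closeBrackets:
--             bracketCount -= 1
--             if bracketCount == 0:
--                 # You are out of all the brackets, so it isn't surrounded.
--                 return False
--
--     # The expression never got out of all the brackets, so it is surrounded.
--     return True
-- ===== SOURCE B (Python) =====
-- def _scan(seg, openBrackets, closeBrackets):
--     """Divide and conquer: return (min prefix-sum, total sum) of the +1/-1/0
--     bracket deltas of seg, combining halves with the (min,+) monoid rule."""
--     if not seg:
--         return (0, 0)
--     if len(seg) == 1:
--         c = seg[0]
--         d = 1 if c in openBrackets else (-1 if c in closeBrackets else 0)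
--         return (min(0, d), d)
--     k = len(seg) // 2
--     m1, t1 = _scan(seg[:k], openBrackets, closeBrackets)
--     m2, t2 = _scan(seg[k:], openBrackets, closeBrackets)
--     return (min(m1, t1 + m2), t1 + t2)
--
--
-- def removableBrackets(exp, openBrackets, closeBrackets):
--     if not (exp[0] in openBrackets and exp[-1] in closeBrackets):
--         return False
--     m, _ = _scan(exp[1:-1], openBrackets, closeBrackets)
--     return 1 + m > 0
-- ===== Notes on version B (the rewrite author's own statement) =====
-- stated objective: alternative
-- what changed: Replaced A's sequential depth counter with early return when the balance hits zero by a divide-and-conquer computation of (min prefix-sum, total) of the +1/-1/0 bracket deltas, combined with the (min,+) monoid rule, followed by one final positivity test.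
-- outside the precondition, e.g. on removableBrackets('', ['('], [')']): A raises IndexError, B raises IndexError
import Mathlib
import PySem

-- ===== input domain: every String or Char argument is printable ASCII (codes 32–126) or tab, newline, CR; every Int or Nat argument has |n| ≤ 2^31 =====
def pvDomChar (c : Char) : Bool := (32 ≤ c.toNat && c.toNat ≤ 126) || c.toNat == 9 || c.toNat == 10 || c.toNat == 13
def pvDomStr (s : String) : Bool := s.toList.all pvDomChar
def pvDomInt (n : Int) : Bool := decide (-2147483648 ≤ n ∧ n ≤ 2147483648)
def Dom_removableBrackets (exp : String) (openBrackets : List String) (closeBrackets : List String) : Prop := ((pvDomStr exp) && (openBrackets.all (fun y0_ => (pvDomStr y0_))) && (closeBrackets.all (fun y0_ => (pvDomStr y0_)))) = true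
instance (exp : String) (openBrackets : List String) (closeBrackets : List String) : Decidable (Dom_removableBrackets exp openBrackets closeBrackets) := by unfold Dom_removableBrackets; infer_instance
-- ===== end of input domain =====

-- B replaces A's sequential depth counter (early return when the balance hits zero) by a
-- divide-and-conquer computation of (min prefix-sum, total) of the bracket deltas and one
-- final test (objective: alternative algorithm, same cost).


-- ===== PORT A =====
-- Python's `character in brackets` (a one-char string tested against a list of strings)
def pvCharInA (c : Char) (l : List String) : Bool := l.contains (String.ofList [c])

-- A's for-loop over exp[1:-1] with the running bracketCount and the early `return False`
def pvLoopA (openB closeB : List String) : List Char → Int → Bool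
  | [], _ => true
  | c :: rest, n =>
    if pvCharInA c openB then pvLoopA openB closeB rest (n + 1)
    else if pvCharInA c closeB then
      if n - 1 = 0 then false else pvLoopA openB closeB rest (n - 1)
    else pvLoopA openB closeB rest n

def removableBrackets (exp : String) (openBrackets : List String) (closeBrackets : List String) : Bool :=
  match PySem.Str.pyGet? exp 0, PySem.Str.pyGet? exp (-1) with
  | some f, some l =>
    if !(pvCharInA f openBrackets && pvCharInA l closeBrackets) then false
    else pvLoopA openBrackets closeBrackets (PySem.Str.slice exp (some 1) (some (-1))).toList 1
  | _, _ => false  -- unreachable under Pre_ (Python raises IndexError on empty exp)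

-- ===== PORT B =====
-- Python's `character in brackets`, B's copy
def pvCharInB (c : Char) (l : List String) : Bool := l.contains (String.ofList [c])

-- B's `_scan`: divide and conquer, (min prefix-sum, total sum) of the +1/-1/0 bracket deltas
def pvScanDC (ob cb : List String) : List Char → Int × Int
  | [] => (0, 0)
  | [c] =>
    let d : Int := if pvCharInB c ob then 1 else if pvCharInB c cb then -1 else 0
    (min 0 d, d)
  | a :: b :: rest =>
    let seg := a :: b :: rest
    let k := seg.length / 2
    let p1 := pvScanDC ob cb (seg.take k)
    let p2 := pvScanDC ob cb (seg.drop k)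
    (min p1.1 (p1.2 + p2.1), p1.2 + p2.2)
termination_by seg => seg.length
decreasing_by
  · simp; omega
  · simp; omega

def removableBrackets_alt (exp : String) (openBrackets : List String) (closeBrackets : List String) : Bool :=
  -- the guard; `none` (Python's IndexError on empty exp) is unreachable under Pre_
  (((PySem.Str.pyGet? exp 0).bind fun f =>
    (PySem.Str.pyGet? exp (-1)).map fun l =>
      if !(pvCharInB f openBrackets && pvCharInB l closeBrackets) then false
      else
        let p := pvScanDC openBrackets closeBrackets (PySem.Str.slice exp (some 1) (some (-1))).toList
        decide (1 + p.1 > 0))).getD false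

-- ===== PRECONDITION & SPEC =====
-- Pre_ excludes only the empty string, on which Python's exp[0] raises IndexError.
def Pre_removableBrackets (exp : String) (openBrackets : List String) (closeBrackets : List String) : Prop := exp.toList ≠ []
instance (exp : String) (openBrackets : List String) (closeBrackets : List String) : Decidable (Pre_removableBrackets exp openBrackets closeBrackets) := by unfold Pre_removableBrackets; infer_instance
def pvWitness_removableBrackets : String × List String × List String := ("(a)", ["(", "["], [")", "]"])

def Spec_removableBrackets (exp : String) (openBrackets : List String) (closeBrackets : List String) (out : Bool) : Prop := out = removableBrackets_alt exp openBrackets closeBrackets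
instance (exp : String) (openBrackets : List String) (closeBrackets : List String) (out : Bool) : Decidable (Spec_removableBrackets exp openBrackets closeBrackets out) := by unfold Spec_removableBrackets; infer_instance

-- ===== CLAIM (what is proved, stated in full; the proofs are below) =====
def Claim_equal_removableBrackets : Prop := ∀ (exp : String) (openBrackets : List String) (closeBrackets : List String), Dom_removableBrackets exp openBrackets closeBrackets → Pre_removableBrackets exp openBrackets closeBrackets → Spec_removableBrackets exp openBrackets closeBrackets (removableBrackets exp openBrackets closeBrackets)

-- ===== LEMMAS AND PROOFS =====

theorem pvCharInB_eq_A : pvCharInB = pvCharInA := rfl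

-- proof-side reference: sequential (min prefix-sum, total sum) of the bracket deltas
def pvMT (ob cb : List String) : List Char → Int × Int
  | [] => (0, 0)
  | c :: s =>
    let d : Int := if pvCharInA c ob then 1 else if pvCharInA c cb then -1 else 0
    (min 0 (d + (pvMT ob cb s).1), d + (pvMT ob cb s).2)

theorem pvMT_fst_nonpos (ob cb : List String) (cs : List Char) : (pvMT ob cb cs).1 ≤ 0 := by
  cases cs with
  | nil => simp [pvMT]
  | cons c s => simp [pvMT]

theorem pvMT_append (ob cb : List String) (xs ys : List Char) :
    pvMT ob cb (xs ++ ys)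
      = (min (pvMT ob cb xs).1 ((pvMT ob cb xs).2 + (pvMT ob cb ys).1),
         (pvMT ob cb xs).2 + (pvMT ob cb ys).2) := by
  induction xs with
  | nil =>
    have h := pvMT_fst_nonpos ob cb ys
    simp only [List.nil_append, pvMT]
    refine Prod.ext ?_ ?_ <;> simp <;> omega
  | cons c s ih =>
    simp only [List.cons_append, pvMT, ih]
    generalize (if pvCharInA c ob = true then (1 : Int) else if pvCharInA c cb = true then -1 else 0) = d
    refine Prod.ext ?_ ?_ <;> simp only [Prod.mk.injEq] <;> omega

theorem pvScanDC_eq_pvMT_aux (ob cb : List String) (n : Nat) :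
    ∀ seg : List Char, seg.length ≤ n → pvScanDC ob cb seg = pvMT ob cb seg := by
  induction n with
  | zero =>
    intro seg h
    have hseg : seg = [] := by cases seg <;> simp_all
    subst hseg
    simp [pvScanDC, pvMT]
  | succ n ih =>
    intro seg h
    match seg with
    | [] => simp [pvScanDC, pvMT]
    | [c] =>
      simp only [pvScanDC, pvMT, pvCharInB_eq_A]
      refine Prod.ext ?_ ?_ <;> simp <;> rfl
    | a :: b :: rest =>
      rw [pvScanDC]
      rw [ih _ (by simp at h ⊢; omega), ih _ (by simp at h ⊢; omega)]
      conv_rhs => rw [show (a :: b :: rest)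
        = ((a :: b :: rest).take ((a :: b :: rest).length / 2)
            ++ (a :: b :: rest).drop ((a :: b :: rest).length / 2))
          from (List.take_append_drop _ _).symm]
      rw [pvMT_append]

theorem pvScanDC_eq_pvMT (ob cb : List String) (seg : List Char) :
    pvScanDC ob cb seg = pvMT ob cb seg :=
  pvScanDC_eq_pvMT_aux ob cb seg.length seg (le_refl _)

-- A's loop is the "1 + min prefix-sum stays positive" test (for a start value n ≥ 1)
theorem pvLoopA_eq_pvMT (ob cb : List String) (cs : List Char) (n : Int) (hn : 1 ≤ n) :
    pvLoopA ob cb cs n = decide (n + (pvMT ob cb cs).1 > 0) := by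
  induction cs generalizing n with
  | nil =>
    simp only [pvLoopA, pvMT]
    rw [eq_comm, decide_eq_true_iff]
    omega
  | cons c s ih =>
    have hms := pvMT_fst_nonpos ob cb s
    by_cases h1 : pvCharInA c ob
    · rw [show pvLoopA ob cb (c :: s) n = pvLoopA ob cb s (n + 1) from by simp [pvLoopA, h1],
        ih (n + 1) (by omega)]
      simp only [pvMT, h1, if_pos]
      rw [decide_eq_decide]
      omega
    · by_cases h2 : pvCharInA c cb
      · by_cases h3 : n - 1 = 0
        · rw [show pvLoopA ob cb (c :: s) n = false from by simp [pvLoopA, h1, h2, h3]]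
          simp only [pvMT, h1, h2, Bool.false_eq_true, ite_false, ite_true]
          rw [eq_comm, decide_eq_false_iff_not]
          omega
        · rw [show pvLoopA ob cb (c :: s) n = pvLoopA ob cb s (n - 1) from by
              simp [pvLoopA, h1, h2, h3],
            ih (n - 1) (by omega)]
          simp only [pvMT, h1, h2, Bool.false_eq_true, ite_false, ite_true]
          rw [decide_eq_decide]
          omega
      · rw [show pvLoopA ob cb (c :: s) n = pvLoopA ob cb s n from by simp [pvLoopA, h1, h2],
          ih n hn]
        simp only [pvMT, h1, h2, Bool.false_eq_true, ite_false]
        rw [decide_eq_decide]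
        omega

-- ===== VERDICT (by name: the statement is the Claim_ definition above) =====
theorem removableBrackets_spec : Claim_equal_removableBrackets := by
  intro exp ob cb _ _
  unfold Spec_removableBrackets removableBrackets removableBrackets_alt
  cases hf : PySem.Str.pyGet? exp 0 with
  | none => rfl
  | some f =>
    cases hl : PySem.Str.pyGet? exp (-1) with
    | none => rfl
    | some l =>
      simp only [Option.bind_some, Option.map_some, Option.getD_some]
      by_cases hg : pvCharInA f ob && pvCharInA l cb
      · simp only [pvCharInB_eq_A, hg, Bool.not_true, Bool.false_eq_true, if_false]
        rw [pvScanDC_eq_pvMT,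
          pvLoopA_eq_pvMT ob cb (PySem.Str.slice exp (some 1) (some (-1))).toList 1 (le_refl 1)]
      · simp [pvCharInB_eq_A, hg]
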